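-- pv_equiv track=rewrite | github.com/HalfMoonRain/python_algorithm | Level1/햄버거_만들기.py | solution
-- ===== SOURCE A (Python) =====
-- def solution(ingredient):
--     count = 0
--     i = 0
--     result = []
--     while i < len(ingredient) - 3:
--         if ingredient[i:i+4] == [1,2,3,1]:
--             count +=1
--             i += 4
--         else:
--             result.append(ingredient[i])
--             i += 1
--
--     return count
-- ===== SOURCE B (Python) =====
-- def solution(ingredient):
--     # One-pass matching automaton for the pattern [1,2,3,1]: state q is the
--     # length of the longest pattern prefix matching a suffix of what was read;
--     # a completed match increments the count and resets the state.
--     count = 0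
--     q = 0
--     for x in ingredient:
--         if q == 0:
--             q = 1 if x == 1 else 0
--         elif q == 1:
--             q = 2 if x == 2 else (1 if x == 1 else 0)
--         elif q == 2:
--             q = 3 if x == 3 else (1 if x == 1 else 0)
--         else:
--             if x == 1:
--                 count += 1
--             q = 0
--     return count
-- ===== Notes on version B (the rewrite author's own statement) =====
-- stated objective: faster
-- what changed: Replaces A's index-walking loop that compares a 4-element slice at each position (and keeps a dead result list) with a single-pass KMP-style finite automaton whose state is the length of the current pattern-prefix match, incrementing the count on completion.
import Mathlib
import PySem

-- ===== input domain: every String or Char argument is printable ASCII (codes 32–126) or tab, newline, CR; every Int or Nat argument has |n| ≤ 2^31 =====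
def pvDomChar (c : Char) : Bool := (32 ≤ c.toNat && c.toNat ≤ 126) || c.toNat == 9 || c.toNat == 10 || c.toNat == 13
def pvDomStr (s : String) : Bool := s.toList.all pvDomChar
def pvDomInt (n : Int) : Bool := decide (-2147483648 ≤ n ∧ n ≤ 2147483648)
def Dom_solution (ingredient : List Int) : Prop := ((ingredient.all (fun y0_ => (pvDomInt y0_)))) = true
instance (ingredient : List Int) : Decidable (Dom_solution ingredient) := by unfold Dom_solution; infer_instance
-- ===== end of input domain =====

-- B replaces A's slice-comparing index walk (with its dead result list) by a
-- single-pass KMP-style matching automaton (no per-step slice allocation; measured faster).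

-- ===== PORT A =====
-- while loop ported as well-founded recursion on the remaining index range;
-- ingredient[i] is always in range in the else branch, ported with pyGetD (exact there).
def solutionGo (ingredient : List Int) (count : Int) (i : Int) (result : List Int) : Int :=
  if _h : i < (ingredient.length : Int) - 3 then
    if PySem.List.slice ingredient (some i) (some (i + 4)) = [1, 2, 3, 1] then
      solutionGo ingredient (count + 1) (i + 4) result
    else
      solutionGo ingredient count (i + 1) (result ++ [PySem.List.pyGetD ingredient i 0])
  else
    count
termination_by ((ingredient.length : Int) - 3 - i).toNat
decreasing_by all_goals omega

def solution (ingredient : List Int) : Int :=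
  solutionGo ingredient 0 0 []

-- ===== PORT B =====
-- transcription of Source B's for loop: fold over the list carrying (count, q)
def solutionStep (s : Int × Int) (x : Int) : Int × Int :=
  if s.2 = 0 then (s.1, if x = 1 then 1 else 0)
  else if s.2 = 1 then (s.1, if x = 2 then 2 else if x = 1 then 1 else 0)
  else if s.2 = 2 then (s.1, if x = 3 then 3 else if x = 1 then 1 else 0)
  else (if x = 1 then s.1 + 1 else s.1, 0)

def solution_alt (ingredient : List Int) : Int :=
  (ingredient.foldl solutionStep (0, 0)).1

-- ===== PRECONDITION & SPEC =====
def Spec_solution (ingredient : List Int) (out : Int) : Prop := out = solution_alt ingredient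
instance (ingredient : List Int) (out : Int) : Decidable (Spec_solution ingredient out) := by unfold Spec_solution; infer_instance

-- ===== CLAIM (what is proved, stated in full; the proofs are below) =====
def Claim_equal_solution : Prop := ∀ (ingredient : List Int), Dom_solution ingredient → Spec_solution ingredient (solution ingredient)

-- ===== LEMMAS AND PROOFS =====

-- greedy non-overlapping count of [1,2,3,1], recursing on the list itself:
-- the common reference form both ports are reduced to
def gcount : List Int → Nat
  | [] => 0
  | c :: t =>
    if [1, 2, 3, 1].isPrefixOf (c :: t) then 1 + gcount ((c :: t).drop 4)
    else gcount t
termination_by l => l.length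
decreasing_by all_goals simp

lemma gcount_short : ∀ (l : List Int), l.length ≤ 3 → gcount l = 0 := by
  intro l
  induction l with
  | nil => simp [gcount]
  | cons c t ih =>
    intro h
    rw [gcount]
    have hnp : ¬ (([1, 2, 3, 1] : List Int).isPrefixOf (c :: t) = true) := by
      intro hp
      have := (List.isPrefixOf_iff_prefix.mp hp).length_le
      simp at this h; omega
    rw [if_neg hnp]
    exact ih (by simp at h; omega)

lemma gcount_cons_ne_one (x : Int) (l : List Int) (hx : x ≠ 1) :
    gcount (x :: l) = gcount l := by
  rw [gcount]
  rw [if_neg (by simp [List.isPrefixOf]; intro h; exact absurd h.symm hx)]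

lemma gcount_11 (l : List Int) : gcount (1 :: 1 :: l) = gcount (1 :: l) := by
  rw [gcount]
  rw [if_neg (by simp [List.isPrefixOf])]

lemma gcount_1x (x : Int) (l : List Int) (h2 : x ≠ 2) (h1 : x ≠ 1) :
    gcount (1 :: x :: l) = gcount l := by
  rw [gcount]
  rw [if_neg (by simp [List.isPrefixOf]; intro h; exact absurd h.symm h2)]
  exact gcount_cons_ne_one x l h1

lemma gcount_121 (l : List Int) : gcount (1 :: 2 :: 1 :: l) = gcount (1 :: l) := by
  rw [gcount]
  rw [if_neg (by simp [List.isPrefixOf])]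
  exact gcount_cons_ne_one 2 _ (by decide)

lemma gcount_12x (x : Int) (l : List Int) (h3 : x ≠ 3) (h1 : x ≠ 1) :
    gcount (1 :: 2 :: x :: l) = gcount l := by
  rw [gcount]
  rw [if_neg (by simp [List.isPrefixOf]; intro h; exact absurd h.symm h3)]
  rw [gcount_cons_ne_one 2 _ (by decide)]
  exact gcount_cons_ne_one x l h1

lemma gcount_1231 (l : List Int) : gcount (1 :: 2 :: 3 :: 1 :: l) = 1 + gcount l := by
  rw [gcount]
  rw [if_pos (by simp [List.isPrefixOf])]
  simp

lemma gcount_123x (x : Int) (l : List Int) (h1 : x ≠ 1) :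
    gcount (1 :: 2 :: 3 :: x :: l) = gcount l := by
  rw [gcount]
  rw [if_neg (by simp [List.isPrefixOf]; intro h; exact absurd h.symm h1)]
  rw [gcount_cons_ne_one 2 _ (by decide), gcount_cons_ne_one 3 _ (by decide)]
  exact gcount_cons_ne_one x l h1

-- the pattern prefix encoded by automaton state q
def statePrefix (q : Int) : List Int :=
  if q = 1 then [1] else if q = 2 then [1, 2] else if q = 3 then [1, 2, 3] else []

-- fold invariant: running the automaton from state q counts exactly the greedy
-- matches in (statePrefix q) ++ l
lemma fold_eq_gcount : ∀ (l : List Int) (count q : Int),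
    (q = 0 ∨ q = 1 ∨ q = 2 ∨ q = 3) →
    (l.foldl solutionStep (count, q)).1 = count + (gcount (statePrefix q ++ l) : Int) := by
  intro l
  induction l with
  | nil =>
    intro count q hq
    have : gcount (statePrefix q) = 0 := by
      apply gcount_short
      rcases hq with h | h | h | h <;> subst h <;> decide
    simp [this]
  | cons x t ih =>
    intro count q hq
    rw [List.foldl_cons]
    rcases hq with h | h | h | h <;> subst h <;>
      simp only [solutionStep, statePrefix] <;> norm_num
    · by_cases hx1 : x = 1
      · subst hx1
        rw [if_pos rfl, ih count 1 (by norm_num)]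
        simp [statePrefix]
      · rw [if_neg hx1, ih count 0 (by norm_num)]
        simp only [statePrefix]; norm_num
        rw [gcount_cons_ne_one x t hx1]
    · by_cases hx2 : x = 2
      · subst hx2
        rw [if_pos rfl, ih count 2 (by norm_num)]
        simp [statePrefix]
      · rw [if_neg hx2]
        by_cases hx1 : x = 1
        · subst hx1
          rw [if_pos rfl, ih count 1 (by norm_num)]
          simp only [statePrefix]; norm_num
          rw [gcount_11]
        · rw [if_neg hx1, ih count 0 (by norm_num)]
          simp only [statePrefix]; norm_num
          rw [gcount_1x x t hx2 hx1]
    · by_cases hx3 : x = 3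
      · subst hx3
        rw [if_pos rfl, ih count 3 (by norm_num)]
        simp [statePrefix]
      · rw [if_neg hx3]
        by_cases hx1 : x = 1
        · subst hx1
          rw [if_pos rfl, ih count 1 (by norm_num)]
          simp only [statePrefix]; norm_num
          rw [gcount_121]
        · rw [if_neg hx1, ih count 0 (by norm_num)]
          simp only [statePrefix]; norm_num
          rw [gcount_12x x t hx3 hx1]
    · by_cases hx1 : x = 1
      · subst hx1
        rw [if_pos rfl, ih (count + 1) 0 (by norm_num)]
        simp only [statePrefix]; norm_num
        rw [gcount_1231]
        push_cast; ring
      · rw [if_neg hx1, ih count 0 (by norm_num)]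
        simp only [statePrefix]; norm_num
        rw [gcount_123x x t hx1]

-- A's loop computes the same greedy count
lemma loop_eq (ing : List Int) (i : Nat) (count : Int) (result : List Int) :
    solutionGo ing count (i : Int) result = count + (gcount (ing.drop i) : Int) := by
  rw [solutionGo]
  by_cases hlt : (i : Int) < (ing.length : Int) - 3
  · rw [dif_pos hlt]
    have hdlen : 4 ≤ (ing.drop i).length := by rw [List.length_drop]; omega
    have hslice : PySem.List.slice ing (some (i : Int)) (some ((i : Int) + 4)) =
        (ing.drop i).take 4 := by
      have := PySem.List.slice_natCast_add (xs := ing) (j := i) (n := 4)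
      simpa using this
    by_cases hm : (ing.drop i).take 4 = [1, 2, 3, 1]
    · rw [if_pos (by rw [hslice]; exact hm)]
      have hc4 : ((i : Int) + 4) = ((i + 4 : Nat) : Int) := by push_cast; ring
      rw [hc4, loop_eq ing (i + 4) (count + 1) result]
      have hpre : ([1, 2, 3, 1] : List Int).isPrefixOf (ing.drop i) = true := by
        rw [List.isPrefixOf_iff_prefix]
        exact hm ▸ List.take_prefix 4 (ing.drop i)
      have hg : gcount (ing.drop i) = 1 + gcount ((ing.drop i).drop 4) := by
        cases h : ing.drop i with
        | nil => rw [h] at hpre; simp [List.isPrefixOf] at hpre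
        | cons c t => rw [gcount, if_pos (h ▸ hpre)]
      rw [hg, List.drop_drop]
      push_cast; ring
    · rw [if_neg (by rw [hslice]; exact hm)]
      have hc1 : ((i : Int) + 1) = ((i + 1 : Nat) : Int) := by push_cast; ring
      rw [hc1, loop_eq ing (i + 1) count (result ++ [PySem.List.pyGetD ing (i : Int) 0])]
      have hi : i < ing.length := by omega
      have hdrop : ing.drop i = ing[i] :: ing.drop (i + 1) := List.drop_eq_getElem_cons hi
      have hpre : ¬ (([1, 2, 3, 1] : List Int).isPrefixOf (ing.drop i) = true) := by
        intro hp
        exact hm ((List.prefix_iff_eq_take.mp (List.isPrefixOf_iff_prefix.mp hp)).symm)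
      rw [hdrop] at hpre ⊢
      rw [gcount, if_neg hpre]
  · rw [dif_neg hlt]
    have : (ing.drop i).length ≤ 3 := by rw [List.length_drop]; omega
    rw [gcount_short _ this]; simp
termination_by ing.length - i
decreasing_by all_goals omega

-- ===== VERDICT (by name: the statement is the Claim_ definition above) =====
theorem solution_spec : Claim_equal_solution := by
  intro ingredient _
  show solution ingredient = solution_alt ingredient
  unfold solution solution_alt
  have hA := loop_eq ingredient 0 0 []
  simp only [Nat.cast_zero, List.drop_zero] at hA
  have hB := fold_eq_gcount ingredient 0 0 (by norm_num)
  simp only [statePrefix] at hB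
  rw [hA, hB]
  norm_num
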